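-- pv_equiv track=rewrite | github.com/richrd/suplemon | suplemon/utils.py | divide_evenly
-- ===== SOURCE A (Python) =====
-- def divide_evenly(n, divisor):
--     """
--     Devide n into equal or almost equal items and return as list of integers.
--
--     The remainder is distributed between the first items of the returned list.
--     """
--     if n < divisor:
--         return ([1] * n) + ([0] * (divisor - n))
--
--     results = ([n/divisor]*divisor)
--     remainder = n % divisor
--     items = list(map(int, results))
--     for i in range(len(items)):
--         if not remainder:
--             break
--         items[i] += 1
--         remainder -= 1
--     return items
-- ===== SOURCE B (Python) =====
-- def divide_evenly(n, divisor):
--     """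
--     Devide n into equal or almost equal items and return as list of integers.
--
--     The remainder is distributed between the first items of the returned list.
--     """
--     if n < divisor:
--         return ([1] * n) + ([0] * (divisor - n))
--     base = int(n / divisor)
--     remainder = n % divisor
--     return ([base + 1] * remainder) + ([base] * (divisor - remainder))
-- ===== Notes on version B (the rewrite author's own statement) =====
-- stated objective: simpler
-- what changed: Replaces the prebuilt-list-plus-per-index-increment loop (and the map(int, ...) pass) with a closed-form concatenation of two constant lists [base+1]*remainder + [base]*(divisor-remainder).
import Mathlib
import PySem

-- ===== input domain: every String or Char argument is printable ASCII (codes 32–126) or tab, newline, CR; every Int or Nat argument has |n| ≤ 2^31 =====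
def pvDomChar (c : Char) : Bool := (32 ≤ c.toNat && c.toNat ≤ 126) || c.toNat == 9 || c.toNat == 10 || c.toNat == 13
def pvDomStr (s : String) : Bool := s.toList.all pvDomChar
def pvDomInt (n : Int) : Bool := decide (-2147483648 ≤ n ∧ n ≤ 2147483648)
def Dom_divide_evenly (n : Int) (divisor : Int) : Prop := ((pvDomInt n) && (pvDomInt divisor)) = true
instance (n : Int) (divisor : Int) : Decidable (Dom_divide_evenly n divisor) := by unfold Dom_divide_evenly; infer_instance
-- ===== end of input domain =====

-- B replaces A's per-index increment loop with a closed-form concatenation of two constant lists (simpler, same cost).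


-- ===== PORT A =====
-- the for-loop: walk the items; if remainder is 0 break, else add 1 to the item and decrement remainder
def divideEvenlyLoop : List Int → Int → List Int
  | [], _ => []
  | x :: xs, r => if r = 0 then x :: xs else (x + 1) :: divideEvenlyLoop xs (r - 1)

-- int(n/divisor): Python float division then truncation; exact truncated division (Int.tdiv)
-- for |n|,|divisor| ≤ 2^31 (the quotient is below 2^53 in magnitude, so the rounded double
-- can only cross an integer when the division is exact).
def divide_evenly (n : Int) (divisor : Int) : List Int :=
  if n < divisor then
    List.replicate n.toNat 1 ++ List.replicate (divisor - n).toNat 0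
  else
    let remainder := PySem.Int.mod n divisor
    let items := List.replicate divisor.toNat (Int.tdiv n divisor)
    divideEvenlyLoop items remainder

-- ===== PORT B =====
def divide_evenly_alt (n : Int) (divisor : Int) : List Int :=
  if n < divisor then
    List.replicate n.toNat 1 ++ List.replicate (divisor - n).toNat 0
  else
    let base := Int.tdiv n divisor
    let remainder := PySem.Int.mod n divisor
    List.replicate remainder.toNat (base + 1) ++ List.replicate (divisor - remainder).toNat base

-- ===== PRECONDITION & SPEC =====
-- A raises ZeroDivisionError exactly when divisor = 0 and 0 ≤ n (then the guard is not taken and n/0 is evaluated).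
def Pre_divide_evenly (n : Int) (divisor : Int) : Prop := ¬(divisor = 0 ∧ 0 ≤ n)
instance (n : Int) (divisor : Int) : Decidable (Pre_divide_evenly n divisor) := by unfold Pre_divide_evenly; infer_instance
def pvWitness_divide_evenly : Int × Int := (10, 3)

def Spec_divide_evenly (n : Int) (divisor : Int) (out : List Int) : Prop := out = divide_evenly_alt n divisor
instance (n : Int) (divisor : Int) (out : List Int) : Decidable (Spec_divide_evenly n divisor out) := by unfold Spec_divide_evenly; infer_instance

-- ===== CLAIM (what is proved, stated in full; the proofs are below) =====
def Claim_equal_divide_evenly : Prop := ∀ (n : Int) (divisor : Int), Dom_divide_evenly n divisor → Pre_divide_evenly n divisor → Spec_divide_evenly n divisor (divide_evenly n divisor)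

-- ===== LEMMAS AND PROOFS =====

-- the loop increments the first r items of a constant list: closed form
theorem divideEvenlyLoop_replicate (b : Int) :
    ∀ (k : Nat) (r : Int), 0 ≤ r → r ≤ (k : Int) →
      divideEvenlyLoop (List.replicate k b) r =
        List.replicate r.toNat (b + 1) ++ List.replicate (k - r.toNat) b := by
  intro k
  induction k with
  | zero =>
    intro r h0 hk
    have : r = 0 := le_antisymm (by exact_mod_cast hk) h0
    simp [this, divideEvenlyLoop]
  | succ k ih =>
    intro r h0 hk
    by_cases hr : r = 0
    · simp [hr, divideEvenlyLoop, List.replicate_succ]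
    · have h1 : 1 ≤ r := by omega
      have : (List.replicate (k + 1) b) = b :: List.replicate k b := by
        simp [List.replicate_succ]
      rw [this]
      simp only [divideEvenlyLoop, if_neg hr]
      rw [ih (r - 1) (by omega) (by omega)]
      have htn : r.toNat = (r - 1).toNat + 1 := by omega
      rw [htn]
      have hkn : k + 1 - ((r - 1).toNat + 1) = k - (r - 1).toNat := by omega
      rw [hkn, List.replicate_succ]
      simp

theorem divide_evenly_eq : ∀ (n divisor : Int), Pre_divide_evenly n divisor → divide_evenly n divisor = divide_evenly_alt n divisor := by
  intro n divisor hpre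
  unfold divide_evenly divide_evenly_alt
  by_cases hlt : n < divisor
  · simp [hlt]
  · simp only [if_neg hlt]
    have hd0 : divisor ≠ 0 := by
      intro h; exact hpre ⟨h, by omega⟩
    set r := PySem.Int.mod n divisor with hr
    rcases lt_or_gt_of_ne hd0 with hneg | hpos
    · -- divisor < 0: every replicate count clamps to 0
      have hb := PySem.Int.mod_neg_bounds (a := n) (b := divisor) hneg
      have h1 : divisor.toNat = 0 := by omega
      have h2 : r.toNat = 0 := by omega
      have h3 : (divisor - r).toNat = 0 := by omega
      simp [h1, h2, h3, divideEvenlyLoop]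
    · -- divisor > 0: 0 ≤ r < divisor
      have hrn : 0 ≤ r := PySem.Int.mod_nonneg (a := n) hpos
      have hrlt : r < divisor := PySem.Int.mod_lt (a := n) hpos
      rw [divideEvenlyLoop_replicate _ divisor.toNat r hrn (by omega)]
      congr 1
      congr 1
      omega

-- ===== VERDICT (by name: the statement is the Claim_ definition above) =====
theorem divide_evenly_spec : Claim_equal_divide_evenly := by
  intro n divisor _ hpre
  exact divide_evenly_eq n divisor hpre
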